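-- pv_equiv track=rewrite | github.com/Leesowon/codingTest | 프로그래머스/0/120875. 평행/평행.py | solution
-- ===== SOURCE A (Python) =====
-- from itertools import permutations
--
-- def solution(dots):
--     answer = 0
--
--     # 인덱스 조합
--     idx = [0, 1, 2, 3]
--     for k in permutations(idx, 4) :
--         i1, i2, i3, i4 = k
--
--         # m1 = (dots[i1][1] - dots[i2][1]) / (dots[i1][0] - dots[i2][0])
--         # m2 = (dots[i3][1] - dots[i4][1]) / (dots[i3][0] - dots[i4][0])
--
--         if (dots[i1][1] - dots[i2][1]) * (dots[i3][0] - dots[i4][0]) == (dots[i3][1] - dots[i4][1]) * (dots[i1][0] - dots[i2][0]) :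
--             answer = 1
--             break
--
--     return answer
-- ===== SOURCE B (Python) =====
-- def solution(dots):
--     def cross(i, j, k, l):
--         return (dots[i][1] - dots[j][1]) * (dots[k][0] - dots[l][0]) \
--             == (dots[k][1] - dots[l][1]) * (dots[i][0] - dots[j][0])
--     return int(cross(0, 1, 2, 3) or cross(0, 2, 1, 3) or cross(0, 3, 1, 2))
-- ===== Notes on version B (the rewrite author's own statement) =====
-- stated objective: simpler
-- what changed: Replaced the loop over all 24 permutations of the four indices (with early break) by a single boolean expression testing the cross-product condition on the 3 distinct pairings of the four points, which cover all 24 permutations up to sign and side symmetry.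
import Mathlib
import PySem

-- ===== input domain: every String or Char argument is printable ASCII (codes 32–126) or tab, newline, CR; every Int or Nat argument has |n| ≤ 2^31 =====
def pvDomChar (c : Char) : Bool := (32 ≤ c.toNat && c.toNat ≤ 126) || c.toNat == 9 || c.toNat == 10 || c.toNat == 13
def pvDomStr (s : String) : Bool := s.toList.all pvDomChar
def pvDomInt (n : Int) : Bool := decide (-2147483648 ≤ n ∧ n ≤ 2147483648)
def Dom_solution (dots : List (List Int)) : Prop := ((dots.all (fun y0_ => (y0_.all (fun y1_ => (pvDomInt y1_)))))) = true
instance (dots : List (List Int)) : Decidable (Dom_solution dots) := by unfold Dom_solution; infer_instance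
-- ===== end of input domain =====

-- B replaces A's loop over all 24 index permutations by one boolean expression over the
-- 3 distinct pairings of the four points (objective: simpler; return value only, no mutation).

-- ===== PORT A =====
-- dots[i][j] for literal in-range indices; Pre_solution excludes the IndexError inputs (pyGet? = none)
def pyIdxA (dots : List (List Int)) (i j : Int) : Int :=
  (PySem.List.pyGet? ((PySem.List.pyGet? dots i).getD []) j).getD 0

-- the 'for k in permutations(idx, 4): … break' loop: first permutation satisfying the test gives 1
def loopA (dots : List (List Int)) : List (List Int) → Int
  | [] => 0
  | k :: rest =>
    match k with
    | [i1, i2, i3, i4] =>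
      if (pyIdxA dots i1 1 - pyIdxA dots i2 1) * (pyIdxA dots i3 0 - pyIdxA dots i4 0)
          = (pyIdxA dots i3 1 - pyIdxA dots i4 1) * (pyIdxA dots i1 0 - pyIdxA dots i2 0)
      then 1 else loopA dots rest
    | _ => loopA dots rest

def solution (dots : List (List Int)) : Int :=
  loopA dots (PySem.List.permutations [0, 1, 2, 3] 4)

-- ===== PORT B =====
def pyIdxB (dots : List (List Int)) (i j : Int) : Int :=
  (PySem.List.pyGet? ((PySem.List.pyGet? dots i).getD []) j).getD 0

def crossB (dots : List (List Int)) (i j k l : Int) : Bool :=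
  (pyIdxB dots i 1 - pyIdxB dots j 1) * (pyIdxB dots k 0 - pyIdxB dots l 0)
    == (pyIdxB dots k 1 - pyIdxB dots l 1) * (pyIdxB dots i 0 - pyIdxB dots j 0)

def solution_alt (dots : List (List Int)) : Int :=
  if crossB dots 0 1 2 3 || crossB dots 0 2 1 3 || crossB dots 0 3 1 2 then 1 else 0

-- ===== PRECONDITION & SPEC =====
-- exactly the inputs where Python A returns: four points present, each with both coordinates
-- (otherwise A raises IndexError at dots[i][j] for some i in 0..3, j in 0..1)
def Pre_solution (dots : List (List Int)) : Prop :=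
  4 ≤ dots.length ∧ ∀ p ∈ dots.take 4, 2 ≤ p.length
instance (dots : List (List Int)) : Decidable (Pre_solution dots) := by
  unfold Pre_solution; infer_instance

def pvWitness_solution : List (List Int) := [[1, 4], [9, 2], [3, 8], [11, 20]]

def Spec_solution (dots : List (List Int)) (out : Int) : Prop := out = solution_alt dots
instance (dots : List (List Int)) (out : Int) : Decidable (Spec_solution dots out) := by
  unfold Spec_solution; infer_instance

-- ===== CLAIM (what is proved, stated in full; the proofs are below) =====
def Claim_equal_solution : Prop :=
  ∀ (dots : List (List Int)), Dom_solution dots → Pre_solution dots →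
    Spec_solution dots (solution dots)

-- ===== LEMMAS AND PROOFS =====
theorem pyIdxB_eq (dots : List (List Int)) (i j : Int) :
    pyIdxB dots i j = pyIdxA dots i j := rfl

theorem perms_eval :
    PySem.List.permutations ([0, 1, 2, 3] : List Int) 4 =
      [[0, 1, 2, 3], [0, 1, 3, 2], [0, 2, 1, 3], [0, 2, 3, 1], [0, 3, 1, 2], [0, 3, 2, 1],
       [1, 0, 2, 3], [1, 0, 3, 2], [1, 2, 0, 3], [1, 2, 3, 0], [1, 3, 0, 2], [1, 3, 2, 0],
       [2, 0, 1, 3], [2, 0, 3, 1], [2, 1, 0, 3], [2, 1, 3, 0], [2, 3, 0, 1], [2, 3, 1, 0],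
       [3, 0, 1, 2], [3, 0, 2, 1], [3, 1, 0, 2], [3, 1, 2, 0], [3, 2, 0, 1], [3, 2, 1, 0]] := by
  decide

-- A's first permutation satisfying the cross test, and B's three pairings, agree: every one of
-- the 24 permutation conditions is one of B's three pairing conditions up to sign and side swap.
theorem solution_eq_alt (dots : List (List Int)) : solution dots = solution_alt dots := by
  unfold solution solution_alt crossB
  rw [perms_eval]
  simp only [loopA, pyIdxB_eq, Bool.or_eq_true, beq_iff_eq]
  generalize (pyIdxA dots 0 0) = x0
  generalize (pyIdxA dots 1 0) = x1
  generalize (pyIdxA dots 2 0) = x2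
  generalize (pyIdxA dots 3 0) = x3
  generalize (pyIdxA dots 0 1) = y0
  generalize (pyIdxA dots 1 1) = y1
  generalize (pyIdxA dots 2 1) = y2
  generalize (pyIdxA dots 3 1) = y3
  by_cases h1 : (y0 - y1) * (x2 - x3) = (y2 - y3) * (x0 - x1)
  · rw [if_pos h1, if_pos (Or.inl (Or.inl h1))]
  · by_cases h2 : (y0 - y2) * (x1 - x3) = (y1 - y3) * (x0 - x2)
    · rw [if_neg h1,
          if_neg (fun h => h1 (by linear_combination -h)),
          if_pos h2, if_pos (Or.inl (Or.inr h2))]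
    · by_cases h3 : (y0 - y3) * (x1 - x2) = (y1 - y2) * (x0 - x3)
      · rw [if_neg h1,
            if_neg (fun h => h1 (by linear_combination -h)),
            if_neg h2,
            if_neg (fun h => h2 (by linear_combination -h)),
            if_pos h3, if_pos (Or.inr h3)]
      · rw [if_neg h1,
            if_neg (fun h => h1 (by linear_combination -h)),
            if_neg h2,
            if_neg (fun h => h2 (by linear_combination -h)),
            if_neg h3,
            if_neg (fun h => h3 (by linear_combination -h)),
            if_neg (fun h => h1 (by linear_combination -h)),
            if_neg (fun h => h1 (by linear_combination h)),
            if_neg (fun h => h3 (by linear_combination -h)),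
            if_neg (fun h => h3 (by linear_combination h)),
            if_neg (fun h => h2 (by linear_combination -h)),
            if_neg (fun h => h2 (by linear_combination h)),
            if_neg (fun h => h2 (by linear_combination -h)),
            if_neg (fun h => h2 (by linear_combination h)),
            if_neg (fun h => h3 (by linear_combination h)),
            if_neg (fun h => h3 (by linear_combination -h)),
            if_neg (fun h => h1 (by linear_combination -h)),
            if_neg (fun h => h1 (by linear_combination h)),
            if_neg (fun h => h3 (by linear_combination -h)),
            if_neg (fun h => h3 (by linear_combination h)),
            if_neg (fun h => h2 (by linear_combination h)),
            if_neg (fun h => h2 (by linear_combination -h)),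
            if_neg (fun h => h1 (by linear_combination h)),
            if_neg (fun h => h1 (by linear_combination -h)),
            if_neg (fun h : (_ ∨ _) ∨ _ => h.elim (fun h' => h'.elim h1 h2) h3)]

-- ===== VERDICT (by name: the statement is the Claim_ definition above) =====
theorem solution_spec : Claim_equal_solution := by
  intro dots _ _
  unfold Spec_solution
  exact solution_eq_alt dots
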